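-- pv_equiv track=rewrite | github.com/cmbenello/141-discussion | solutions/strings_list_sols.py | sl_26_remove_adjacent_k_duplicates
-- ===== SOURCE A (Python) =====
-- from typing import List, Tuple, Optional, Any, Dict, Set
--
-- def sl_26_remove_adjacent_k_duplicates(s: str, k: int) -> str:
--     if k <= 1:
--         return ""
--     stack: List[Tuple[str, int]] = []
--     for ch in s:
--         if stack and stack[0] and stack[-1][0] == ch:
--             c = stack[-1][1] + 1
--             stack[-1] = (ch, c)
--             if c == k:
--                 stack.pop()
--         else:
--             stack.append((ch, 1))
--     return "".join(ch * c for ch, c in stack)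
-- ===== SOURCE B (Python) =====
-- def sl_26_remove_adjacent_k_duplicates(s: str, k: int) -> str:
--     if k <= 1:
--         return ""
--     # Repeated-scan fixed point: delete the leftmost window of k equal
--     # characters, rescan, until no such window remains.
--     changed = True
--     while changed:
--         changed = False
--         for i in range(len(s) - k + 1):
--             if all(s[j] == s[i] for j in range(i, i + k)):
--                 s = s[:i] + s[i + k:]
--                 changed = True
--                 break
--     return s
-- ===== Notes on version B (the rewrite author's own statement) =====
-- stated objective: alternative
-- what changed: Replaces the single-pass counting-stack with a repeated-scan fixed-point computation: scan for the leftmost window of k equal characters, delete it, and rescan until no such window remains.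
import Mathlib
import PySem

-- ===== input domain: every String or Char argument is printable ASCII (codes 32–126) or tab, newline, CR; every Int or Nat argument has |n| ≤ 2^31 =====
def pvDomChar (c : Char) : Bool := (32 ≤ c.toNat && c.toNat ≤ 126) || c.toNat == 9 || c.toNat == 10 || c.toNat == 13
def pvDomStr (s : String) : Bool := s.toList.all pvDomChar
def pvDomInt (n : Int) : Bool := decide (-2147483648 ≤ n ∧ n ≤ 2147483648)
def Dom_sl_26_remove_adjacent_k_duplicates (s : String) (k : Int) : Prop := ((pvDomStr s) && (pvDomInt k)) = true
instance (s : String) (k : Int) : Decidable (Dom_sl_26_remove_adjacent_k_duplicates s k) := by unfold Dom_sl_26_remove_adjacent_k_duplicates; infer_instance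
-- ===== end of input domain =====

-- B replaces A's one-pass counting-stack by a repeated leftmost-k-window deletion
-- loop (alternative decomposition, not faster).

-- ===== PORT A =====
-- stack is kept top-first (head = Python's stack[-1]).
-- Python's `stack and stack[0]` tests stack non-emptiness (stack[0] is a
-- non-empty tuple, hence always truthy), so the port tests only non-emptiness.
def pvAStep (k : Int) (st : List (Char × Int)) (ch : Char) : List (Char × Int) :=
  match st with
  | (c, n) :: rest =>
      if c = ch then
        let m := n + 1
        if m = k then rest else (ch, m) :: rest
      else (ch, 1) :: (c, n) :: rest
  | [] => [(ch, 1)]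

-- "".join(ch * c for ch, c in stack)  (stack printed bottom-first, hence reverse)
def pvAOut (st : List (Char × Int)) : List Char :=
  (st.reverse.map (fun p => List.replicate p.2.toNat p.1)).flatten

def sl_26_remove_adjacent_k_duplicates (s : String) (k : Int) : String :=
  if k ≤ 1 then ""
  else String.ofList (pvAOut (s.toList.foldl (pvAStep k) []))

-- ===== PORT B =====
-- scan for the leftmost window of K equal characters; if found, return the
-- list with that window deleted (Source B: `s = s[:i] + s[i+k:]`).
def pvFind (K : Nat) : List Char → Option (List Char)
  | [] => none
  | c :: cs =>
      -- Source B only scans start positions i with i + k ≤ len(s)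
      if K ≤ cs.length + 1 then
        if (c :: cs).take K = List.replicate K c then some (cs.drop (K - 1))
        else (pvFind K cs).map (c :: ·)
      else none

-- termination measure for the while-loop: each deletion shortens the list
theorem pvFind_length (K : Nat) : ∀ l l', pvFind K l = some l' → l'.length < l.length := by
  intro l
  induction l with
  | nil => intro l' h; simp [pvFind] at h
  | cons c cs ih =>
      intro l' h
      simp only [pvFind] at h
      split at h
      · split at h
        · cases h
          simp only [List.length_cons, List.length_drop]
          omega
        · rcases Option.map_eq_some_iff.mp h with ⟨m, hm, rfl⟩
          have := ih m hm
          simp only [List.length_cons]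
          omega
      · cases h

-- Source B's `while changed` loop: delete the leftmost window, rescan from scratch
def pvLoop (K : Nat) (l : List Char) : List Char :=
  match h : pvFind K l with
  | some l' => pvLoop K l'
  | none => l
  termination_by l.length
  decreasing_by exact pvFind_length K l l' h

def sl_26_remove_adjacent_k_duplicates_alt (s : String) (k : Int) : String :=
  if k ≤ 1 then ""
  else String.ofList (pvLoop k.toNat s.toList)

-- ===== PRECONDITION & SPEC =====
def Spec_sl_26_remove_adjacent_k_duplicates (s : String) (k : Int) (out : String) : Prop := out = sl_26_remove_adjacent_k_duplicates_alt s k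
instance (s : String) (k : Int) (out : String) : Decidable (Spec_sl_26_remove_adjacent_k_duplicates s k out) := by unfold Spec_sl_26_remove_adjacent_k_duplicates; infer_instance

-- ===== CLAIM (what is proved, stated in full; the proofs are below) =====
def Claim_equal_sl_26_remove_adjacent_k_duplicates : Prop := ∀ (s : String) (k : Int), Dom_sl_26_remove_adjacent_k_duplicates s k → Spec_sl_26_remove_adjacent_k_duplicates s k (sl_26_remove_adjacent_k_duplicates s k)

-- ===== LEMMAS AND PROOFS =====

-- stack invariant of A: counts in [1, k), adjacent entries carry distinct chars
def pvGood (k : Int) (st : List (Char × Int)) : Prop :=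
  (∀ p ∈ st, 1 ≤ p.2 ∧ p.2 < k) ∧ st.IsChain (fun p q => p.1 ≠ q.1)

theorem pvGood_nil (k : Int) : pvGood k [] := ⟨by simp, List.isChain_nil⟩

theorem pvStep_push (k : Int) (st : List (Char × Int)) (c : Char)
    (h : ∀ p ∈ st.head?, p.1 ≠ c) : pvAStep k st c = (c, 1) :: st := by
  cases st with
  | nil => rfl
  | cons p rest =>
      obtain ⟨c', n⟩ := p
      have : c' ≠ c := h (c', n) (by simp)
      simp [pvAStep, this]

theorem pvStep_match (k : Int) (c : Char) (n : Int) (rest : List (Char × Int)) :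
    pvAStep k ((c, n) :: rest) c = if n + 1 = k then rest else (c, n + 1) :: rest := by
  simp [pvAStep]

theorem pvGood_step (k : Int) (hk : 2 ≤ k) (st : List (Char × Int)) (ch : Char)
    (h : pvGood k st) : pvGood k (pvAStep k st ch) := by
  obtain ⟨hc, ha⟩ := h
  cases st with
  | nil =>
      refine ⟨?_, List.isChain_singleton _⟩
      intro p hp
      simp only [pvAStep, List.mem_singleton] at hp
      subst hp
      exact ⟨le_refl _, by omega⟩
  | cons p rest =>
      obtain ⟨c, n⟩ := p
      obtain ⟨hhd, htl⟩ := List.isChain_cons.mp ha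
      by_cases hcc : c = ch
      · subst hcc
        rw [pvStep_match]
        by_cases hm : n + 1 = k
        · rw [if_pos hm]
          exact ⟨fun p hp => hc p (List.mem_cons_of_mem _ hp), htl⟩
        · rw [if_neg hm]
          have h1 := hc (c, n) List.mem_cons_self
          refine ⟨?_, List.isChain_cons.mpr ⟨hhd, htl⟩⟩
          intro p hp
          rcases List.mem_cons.mp hp with rfl | hp
          · exact ⟨by simp only; omega, by simp only; omega⟩
          · exact hc p (List.mem_cons_of_mem _ hp)
      · rw [pvStep_push k _ ch (by intro p hp; simp at hp; subst hp; exact hcc)]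
        refine ⟨?_, List.isChain_cons.mpr ⟨?_, ha⟩⟩
        · intro p hp
          rcases List.mem_cons.mp hp with rfl | hp
          · exact ⟨le_refl _, by omega⟩
          · exact hc p hp
        · intro y hy
          simp only [List.head?_cons, Option.mem_def, Option.some.injEq] at hy
          subst hy
          exact fun h => hcc h.symm
theorem pvGood_fold (k : Int) (hk : 2 ≤ k) :
    ∀ (l : List Char) (st : List (Char × Int)), pvGood k st →
      pvGood k (l.foldl (pvAStep k) st) := by
  intro l
  induction l with
  | nil => intro st h; exact h
  | cons c cs ih => intro st h; exact ih _ (pvGood_step k hk st c h)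

-- processing j copies of c on top of (c, n) with n + j ≤ k: the pop, if any,
-- happens exactly at the last copy
theorem pvFoldRep (k : Int) (c : Char) :
    ∀ (j : Nat) (n : Int) (rest : List (Char × Int)), 1 ≤ n → n < k → n + j ≤ k →
      (List.replicate j c).foldl (pvAStep k) ((c, n) :: rest)
        = if n + (j : Int) = k then rest else (c, n + j) :: rest := by
  intro j
  induction j with
  | zero => intro n rest h1 h2 h3; simp; omega
  | succ j ih =>
      intro n rest h1 h2 h3
      rw [List.replicate_succ, List.foldl_cons, pvStep_match]
      by_cases hm : n + 1 = k
      · have hj : j = 0 := by omega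
        subst hj
        rw [if_pos hm]
        simp [hm]
      · rw [if_neg hm]
        rw [ih (n + 1) rest (by omega) (by omega) (by omega)]
        push_cast
        rw [show n + 1 + (j : Int) = n + ((j : Int) + 1) by ring]

-- processing k copies of c leaves any good stack unchanged
theorem pvFoldKRep (k : Int) (hk : 2 ≤ k) (c : Char) (st : List (Char × Int))
    (h : pvGood k st) :
    (List.replicate k.toNat c).foldl (pvAStep k) st = st := by
  obtain ⟨hc, ha⟩ := h
  cases st with
  | nil =>
      have hK : k.toNat = (k.toNat - 1) + 1 := by omega
      rw [hK, List.replicate_succ, List.foldl_cons]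
      show (List.replicate (k.toNat - 1) c).foldl (pvAStep k) [(c, 1)] = []
      rw [pvFoldRep k c (k.toNat - 1) 1 [] (le_refl _) (by omega) (by omega)]
      rw [if_pos (by omega)]
  | cons p rest =>
      obtain ⟨c', n⟩ := p
      have hn := hc (c', n) List.mem_cons_self
      simp only at hn
      by_cases hcc : c' = c
      · subst c'
        have hsplit : k.toNat = (k.toNat - n.toNat) + n.toNat := by omega
        rw [hsplit, List.replicate_add, List.foldl_append]
        rw [pvFoldRep k c (k.toNat - n.toNat) n rest hn.1 hn.2 (by omega)]
        rw [if_pos (by omega)]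
        have hn1 : n.toNat = (n.toNat - 1) + 1 := by omega
        rw [hn1, List.replicate_succ, List.foldl_cons]
        rw [pvStep_push k rest c ?hd]
        case hd =>
          intro p hp
          have := (List.isChain_cons.mp ha).1 p hp
          exact fun h => this h.symm
        rw [pvFoldRep k c (n.toNat - 1) 1 rest (le_refl _) (by omega) (by omega)]
        rw [if_neg (by omega)]
        have h5 : (1 : Int) + ((n.toNat - 1 : Nat) : Int) = n := by omega
        rw [h5]
      · rw [show (List.replicate k.toNat c) = c :: List.replicate (k.toNat - 1) c by
            rw [← List.replicate_succ]; congr 1; omega]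
        rw [List.foldl_cons, pvStep_push k _ c (by
          intro p hp
          simp only [List.head?_cons, Option.mem_def, Option.some.injEq] at hp
          subst hp
          exact hcc)]
        rw [pvFoldRep k c (k.toNat - 1) 1 _ (le_refl _) (by omega) (by omega)]
        rw [if_pos (by omega)]

-- deleting a k-window anywhere does not change A's final stack
theorem pvFold_removeBlock (k : Int) (hk : 2 ≤ k) (u v : List Char) (c : Char) :
    (u ++ List.replicate k.toNat c ++ v).foldl (pvAStep k) []
      = (u ++ v).foldl (pvAStep k) [] := by
  rw [List.foldl_append, List.foldl_append, List.foldl_append]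
  congr 1
  exact pvFoldKRep k hk c _ (pvGood_fold k hk u [] (pvGood_nil k))

theorem pvFind_some_decomp (K : Nat) (hK : 1 ≤ K) :
    ∀ l l', pvFind K l = some l' →
      ∃ u c v, l = u ++ List.replicate K c ++ v ∧ l' = u ++ v := by
  intro l
  induction l with
  | nil => intro l' h; simp [pvFind] at h
  | cons c cs ih =>
      intro l' h
      simp only [pvFind] at h
      split at h
      · split at h
        · rename_i htake
          cases h
          refine ⟨[], c, (c :: cs).drop K, ?_, ?_⟩
          · simp only [List.nil_append]
            conv_lhs => rw [← List.take_append_drop K (c :: cs)]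
            rw [htake]
          · rw [List.nil_append]
            conv_rhs => rw [show K = (K - 1) + 1 by omega, List.drop_succ_cons]
        · rcases Option.map_eq_some_iff.mp h with ⟨m, hm, rfl⟩
          obtain ⟨u, c', v, h1, h2⟩ := ih m hm
          exact ⟨c :: u, c', v, by simp [h1], by simp [h2]⟩
      · cases h

theorem pvLoop_fold (k : Int) (hk : 2 ≤ k) :
    ∀ (N : Nat) (l : List Char), l.length ≤ N →
      (pvLoop k.toNat l).foldl (pvAStep k) [] = l.foldl (pvAStep k) [] := by
  intro N
  induction N with
  | zero =>
      intro l hl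
      have : l = [] := List.length_eq_zero_iff.mp (by omega)
      subst this
      rw [pvLoop]
      simp [pvFind]
  | succ N ih =>
      intro l hl
      rw [pvLoop]
      split
      · rename_i l' h
        have hlen := pvFind_length k.toNat l l' h
        rw [ih l' (by omega)]
        obtain ⟨u, c, v, rfl, rfl⟩ := pvFind_some_decomp k.toNat (by omega) l l' h
        exact (pvFold_removeBlock k hk u v c).symm
      · rfl

theorem pvLoop_none (K : Nat) :
    ∀ (N : Nat) (l : List Char), l.length ≤ N → pvFind K (pvLoop K l) = none := by
  intro N
  induction N with
  | zero =>
      intro l hl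
      have : l = [] := List.length_eq_zero_iff.mp (by omega)
      subst this
      rw [pvLoop]
      simp [pvFind]
  | succ N ih =>
      intro l hl
      rw [pvLoop]
      split
      · rename_i l' h
        have := pvFind_length K l l' h
        exact ih l' (by omega)
      · assumption

theorem pvFind_gt_none (K : Nat) : ∀ l : List Char, l.length < K → pvFind K l = none := by
  intro l
  induction l with
  | nil => intro _; rfl
  | cons c cs ih =>
      intro hlt
      simp only [List.length_cons] at hlt
      simp only [pvFind]
      rw [if_neg (by omega)]

theorem pvFind_none_cons (K : Nat) (c : Char) (cs : List Char)
    (h : pvFind K (c :: cs) = none) : pvFind K cs = none := by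
  simp only [pvFind] at h
  split at h
  · split at h
    · cases h
    · simpa using h
  · rename_i hg
    exact pvFind_gt_none K cs (by omega)

theorem pvFind_none_append (K : Nat) :
    ∀ (u v : List Char), pvFind K (u ++ v) = none → pvFind K v = none := by
  intro u
  induction u with
  | nil => intro v h; simpa using h
  | cons c cs ih => intro v h; exact ih v (pvFind_none_cons K c _ h)

theorem pvHead_dropWhile (p : Char → Bool) :
    ∀ (l : List Char) (x : Char), (l.dropWhile p).head? = some x → p x = false := by
  intro l
  induction l with
  | nil => intro x h; simp at h
  | cons c cs ih =>
      intro x h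
      rw [List.dropWhile_cons] at h
      split at h
      · exact ih x h
      · rename_i hp
        simp only [List.head?_cons, Option.some.injEq] at h
        subst h
        simpa using hp

theorem pvAOut_cons (c : Char) (n : Int) (st : List (Char × Int)) :
    pvAOut ((c, n) :: st) = pvAOut st ++ List.replicate n.toNat c := by
  simp [pvAOut]

-- on a block-free list a good stack with a fresh top just prints the input
theorem pvFold_nf (k : Int) (hk : 2 ≤ k) :
    ∀ (N : Nat) (l : List Char) (st : List (Char × Int)), l.length ≤ N →
      pvGood k st →
      (∀ p ∈ st.head?, ∀ c ∈ l.head?, p.1 ≠ c) →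
      pvFind k.toNat l = none →
      pvAOut (l.foldl (pvAStep k) st) = pvAOut st ++ l := by
  intro N
  induction N with
  | zero =>
      intro l st hl _ _ _
      have : l = [] := List.length_eq_zero_iff.mp (by omega)
      subst this; simp
  | succ N ih =>
      intro l st hl hg hhd hnf
      cases hl0 : l with
      | nil => simp
      | cons c cs =>
          subst hl0
          -- leading run: c :: cs = replicate tw.length c ++ rest, rest not starting with c
          set tw := (c :: cs).takeWhile (fun x => x = c) with htw
          set rest := (c :: cs).dropWhile (fun x => x = c) with hrest
          have hsplit : tw ++ rest = c :: cs := List.takeWhile_append_dropWhile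
          have htw_rep : tw = List.replicate tw.length c := by
            rw [List.eq_replicate_iff]
            refine ⟨rfl, fun b hb => ?_⟩
            have := List.mem_takeWhile_imp hb
            simpa using this
          have htw_pos : 1 ≤ tw.length := by
            rw [htw]
            simp [List.takeWhile_cons]
          have hrest_hd : ∀ d, rest.head? = some d → d ≠ c := by
            intro d hd
            have := pvHead_dropWhile (fun x => x = c) (c :: cs) d (hrest ▸ hd)
            simpa using this
          -- run shorter than k (else the hit condition of pvFind would fire)
          have hrun : tw.length < k.toNat := by
            by_contra hge
            push_neg at hge
            have htake : (c :: cs).take k.toNat = List.replicate k.toNat c := by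
              conv_lhs => rw [← hsplit]
              rw [List.take_append_of_le_length (by omega), htw_rep,
                List.take_replicate]
              congr 1
              omega
            have hlen : k.toNat ≤ cs.length + 1 := by
              have h1 : tw.length ≤ (c :: cs).length := by
                conv_rhs => rw [← hsplit]
                simp
              simp only [List.length_cons] at h1
              omega
            have : pvFind k.toNat (c :: cs) = some (cs.drop (k.toNat - 1)) := by
              simp only [pvFind]
              rw [if_pos hlen, if_pos htake]
            rw [this] at hnf
            cases hnf
          have hfold : (c :: cs).foldl (pvAStep k) st
              = rest.foldl (pvAStep k) ((c, (tw.length : Int)) :: st) := by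
            conv_lhs => rw [← hsplit]
            rw [List.foldl_append]
            congr 1
            rw [htw_rep]
            conv_lhs => rw [show tw.length = (tw.length - 1) + 1 by omega]
            rw [List.replicate_succ, List.foldl_cons]
            rw [pvStep_push k st c (by intro p hp; exact hhd p hp c (by simp))]
            rw [pvFoldRep k c (tw.length - 1) 1 st (le_refl _) (by omega) (by omega)]
            rw [if_neg (by omega)]
            have : (1 : Int) + ((tw.length - 1 : Nat) : Int) = (tw.length : Int) := by omega
            rw [this]
            simp
          rw [hfold]
          have hrest_len : rest.length + tw.length = (c :: cs).length := by
            rw [← hsplit]; simp; omega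
          rw [ih rest ((c, (tw.length : Int)) :: st)
            (by simp only [List.length_cons] at hrest_len hl; omega)
            ?good ?hd ?nf]
          case good =>
            obtain ⟨hc1, ha1⟩ := hg
            refine ⟨?_, List.isChain_cons.mpr ⟨?_, ha1⟩⟩
            · intro p hp
              rcases List.mem_cons.mp hp with rfl | hp
              · exact ⟨by simp only; omega, by simp only; omega⟩
              · exact hc1 p hp
            · intro y hy
              have := hhd y hy c (by simp)
              simp only
              exact fun h => this h.symm
          case hd =>
            intro p hp d hd
            simp only [List.head?_cons, Option.mem_def, Option.some.injEq] at hp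
            subst hp
            simp only
            exact fun h => (hrest_hd d hd) (h ▸ rfl)
          case nf =>
            have : pvFind k.toNat (tw ++ rest) = none := by rw [hsplit]; exact hnf
            exact pvFind_none_append k.toNat tw rest this
          rw [pvAOut_cons, List.append_assoc]
          congr 1
          rw [Int.toNat_natCast]
          conv_rhs => rw [← hsplit]
          congr 1
          exact htw_rep.symm

-- ===== VERDICT (by name: the statement is the Claim_ definition above) =====
theorem sl_26_remove_adjacent_k_duplicates_spec : Claim_equal_sl_26_remove_adjacent_k_duplicates := by
  intro s k _
  unfold Spec_sl_26_remove_adjacent_k_duplicates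
  unfold sl_26_remove_adjacent_k_duplicates sl_26_remove_adjacent_k_duplicates_alt
  by_cases hk1 : k ≤ 1
  · simp [hk1]
  · simp only [if_neg hk1]
    have hk : 2 ≤ k := by omega
    set l := s.toList with hl
    congr 1
    have h1 : (pvLoop k.toNat l).foldl (pvAStep k) [] = l.foldl (pvAStep k) [] :=
      pvLoop_fold k hk l.length l (le_refl _)
    have h2 : pvFind k.toNat (pvLoop k.toNat l) = none :=
      pvLoop_none k.toNat l.length l (le_refl _)
    have h3 : pvAOut ((pvLoop k.toNat l).foldl (pvAStep k) [])
        = pvAOut [] ++ pvLoop k.toNat l :=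
      pvFold_nf k hk (pvLoop k.toNat l).length (pvLoop k.toNat l) []
        (le_refl _) (pvGood_nil k) (by simp) h2
    rw [← h1, h3]
    simp [pvAOut]
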